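-- pv_equiv track=rewrite | github.com/DragunWF/Competitive-Programming | CodeWars/python/7_kyu/dominant_array_elements.py | solve
-- ===== SOURCE A (Python) =====
-- def solve(arr: list[int]) -> list[int]:
--     output = []
--     n = len(arr)
--     for i in range(n):
--         is_dominant = True
--         for j in range(i + 1, n):
--             if arr[i] <= arr[j]:
--                 is_dominant = False
--                 break
--         if is_dominant:
--             output.append(arr[i])
--     return output
-- ===== SOURCE B (Python) =====
-- def solve(arr: list[int]) -> list[int]:
--     # single right-to-left pass tracking the suffix maximum
--     out = []
--     best = None
--     for x in reversed(arr):
--         if best is None or x > best: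
--             out.append(x)
--             best = x
--     out.reverse()
--     return out
-- ===== Notes on version B (the rewrite author's own statement) =====
-- stated objective: faster
-- what changed: Replaced the nested scan (each element compared against its whole suffix) by a single right-to-left pass that keeps the running suffix maximum and collects elements exceeding it, then reverses.
import Mathlib
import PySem

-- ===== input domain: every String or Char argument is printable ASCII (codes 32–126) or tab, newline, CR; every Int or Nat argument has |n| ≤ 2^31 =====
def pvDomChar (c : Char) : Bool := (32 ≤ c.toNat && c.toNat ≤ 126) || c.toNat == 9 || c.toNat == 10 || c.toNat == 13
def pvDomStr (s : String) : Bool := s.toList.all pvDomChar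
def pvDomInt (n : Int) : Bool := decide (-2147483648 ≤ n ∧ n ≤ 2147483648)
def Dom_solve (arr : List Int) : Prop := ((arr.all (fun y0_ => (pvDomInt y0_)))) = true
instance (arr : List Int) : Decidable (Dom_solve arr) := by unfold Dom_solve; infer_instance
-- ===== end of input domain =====

-- B replaces A's quadratic nested scan by one right-to-left pass tracking the suffix maximum (objective: faster).

-- ===== PORT A =====
-- inner 'for j' loop with break: scans arr[i+1:], returns False at the first arr[i] <= arr[j]
def solveInner (x : Int) : List Int → Bool
  | [] => true
  | y :: ys => if x ≤ y then false else solveInner x ys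

-- outer 'for i' loop: position i corresponds to the suffix arr[i:]
def solveAux : List Int → List Int
  | [] => []
  | x :: xs => (if solveInner x xs then [x] else []) ++ solveAux xs

def solve (arr : List Int) : List Int := solveAux arr

-- ===== PORT B =====
-- step of the reversed-order loop: state = (out, best)
def solveStep (p : List Int × Option Int) (x : Int) : List Int × Option Int :=
  match p.2 with
  | none => (p.1 ++ [x], some x)
  | some b => if x > b then (p.1 ++ [x], some x) else p

def solve_alt (arr : List Int) : List Int :=
  (arr.reverse.foldl solveStep ([], none)).1.reverse

-- ===== PRECONDITION & SPEC =====
def Spec_solve (arr : List Int) (out : List Int) : Prop := out = solve_alt arr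
instance (arr : List Int) (out : List Int) : Decidable (Spec_solve arr out) := by unfold Spec_solve; infer_instance

-- ===== CLAIM (what is proved, stated in full; the proofs are below) =====
def Claim_equal_solve : Prop := ∀ (arr : List Int), Dom_solve arr → Spec_solve arr (solve arr)

-- ===== LEMMAS AND PROOFS =====

theorem solveInner_iff (x : Int) (xs : List Int) :
    solveInner x xs = true ↔ ∀ y ∈ xs, y < x := by
  induction xs with
  | nil => simp [solveInner]
  | cons y ys ih =>
    simp only [solveInner, List.mem_cons]
    split_ifs with h
    · constructor
      · intro hc; exact absurd hc (by simp)
      · intro hc; exact absurd (hc y (Or.inl rfl)) (not_lt.mpr h)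
    · rw [ih]
      constructor
      · rintro ha z (rfl | hz)
        · omega
        · exact ha z hz
      · intro ha z hz; exact ha z (Or.inr hz)

-- the main invariant of B's fold (stated as foldr via foldl_reverse)
theorem fold_invariant (arr : List Int) :
    (arr.foldr (fun x p => solveStep p x) ([], none)).1 = (solveAux arr).reverse ∧
    ((arr.foldr (fun x p => solveStep p x) ([], none)).2 = none ↔ arr = []) ∧
    (∀ b, (arr.foldr (fun x p => solveStep p x) ([], none)).2 = some b →
      b ∈ arr ∧ ∀ y ∈ arr, y ≤ b) := by
  induction arr with
  | nil => simp [solveAux]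
  | cons x xs ih =>
    obtain ⟨h1, h2, h3⟩ := ih
    rcases hP : (xs.foldr (fun x p => solveStep p x) ([], none)) with ⟨o, m⟩
    rw [hP] at h1 h2 h3
    dsimp only at h1 h2 h3
    simp only [List.foldr_cons, hP]
    cases m with
    | none =>
      have hxs : xs = [] := h2.mp rfl
      subst hxs
      simp_all [solveStep, solveAux, solveInner]
    | some b =>
      have hxs : xs ≠ [] := by intro h; subst h; simp at hP
      obtain ⟨hbmem, hle⟩ := h3 b rfl
      by_cases hgt : b < x
      · have hdom : solveInner x xs = true := by
          rw [solveInner_iff]; intro y hy; exact lt_of_le_of_lt (hle y hy) hgt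
        refine ⟨?_, ?_, ?_⟩
        · simp [solveStep, hgt, h1, solveAux, hdom]
        · simp [solveStep, hgt]
        · intro c hc
          simp only [solveStep, if_pos hgt] at hc
          injection hc with hc
          subst hc
          refine ⟨List.mem_cons_self, ?_⟩
          intro y hy
          rcases List.mem_cons.mp hy with rfl | hy
          · omega
          · exact le_of_lt (lt_of_le_of_lt (hle y hy) hgt)
      · have hndom : solveInner x xs = false := by
          cases hcase : solveInner x xs
          · rfl
          · exact absurd ((solveInner_iff x xs).mp hcase b hbmem) (by omega)
        refine ⟨?_, ?_, ?_⟩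
        · simp [solveStep, hgt, h1, solveAux, hndom]
        · simp [solveStep, hgt]
        · intro c hc
          simp only [solveStep, if_neg hgt] at hc
          injection hc with hc
          subst hc
          refine ⟨List.mem_cons_of_mem _ hbmem, ?_⟩
          intro y hy
          rcases List.mem_cons.mp hy with rfl | hy
          · omega
          · exact hle y hy

theorem solve_eq_alt (arr : List Int) : solve arr = solve_alt arr := by
  unfold solve solve_alt
  rw [List.foldl_reverse]
  rw [(fold_invariant arr).1]
  simp

-- ===== VERDICT (by name: the statement is the Claim_ definition above) =====
theorem solve_spec : Claim_equal_solve := by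
  intro arr _
  unfold Spec_solve
  exact solve_eq_alt arr
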